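-- pv_equiv track=rewrite | github.com/danieleschmidt/gan-cyber-range-v2 | gan_cyber_range/optimization/query_optimizer.py | _identify_parallel_operations
-- ===== SOURCE A (Python) =====
-- from typing import Dict, Any, List, Optional, Callable, Union, Tuple
--
-- def _identify_parallel_operations(operations: List[Dict[str, Any]]) -> List[List[int]]:
--     """Identify operations that can be executed in parallel"""
--
--     parallel_groups = []
--
--     # Simple parallelization: filters can often run in parallel
--     filter_ops = [i for i, op in enumerate(operations) if op["type"] == "filter"]
--     if len(filter_ops) > 1:
--         parallel_groups.append(filter_ops)
--
--     # Aggregations on different fields can be parallel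
--     agg_ops = [i for i, op in enumerate(operations) if op["type"] == "aggregate"]
--     if len(agg_ops) > 1:
--         parallel_groups.append(agg_ops)
--
--     return parallel_groups
-- ===== SOURCE B (Python) =====
-- def _identify_parallel_operations(operations):
--     """Identify operations that can be executed in parallel (single grouping pass)."""
--     index = {}
--     for i, op in enumerate(operations):
--         index.setdefault(op["type"], []).append(i)
--     parallel_groups = []
--     for key in ("filter", "aggregate"):
--         group = index.get(key, [])
--         if len(group) > 1:
--             parallel_groups.append(group)
--     return parallel_groups
-- ===== Notes on version B (the rewrite author's own statement) =====
-- stated objective: alternative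
-- what changed: B groups indices by op type in a single pass over enumerate(operations) into a dict and then emits the 'filter' and 'aggregate' groups by lookup, replacing A's two separate comprehension scans.
import Mathlib
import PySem

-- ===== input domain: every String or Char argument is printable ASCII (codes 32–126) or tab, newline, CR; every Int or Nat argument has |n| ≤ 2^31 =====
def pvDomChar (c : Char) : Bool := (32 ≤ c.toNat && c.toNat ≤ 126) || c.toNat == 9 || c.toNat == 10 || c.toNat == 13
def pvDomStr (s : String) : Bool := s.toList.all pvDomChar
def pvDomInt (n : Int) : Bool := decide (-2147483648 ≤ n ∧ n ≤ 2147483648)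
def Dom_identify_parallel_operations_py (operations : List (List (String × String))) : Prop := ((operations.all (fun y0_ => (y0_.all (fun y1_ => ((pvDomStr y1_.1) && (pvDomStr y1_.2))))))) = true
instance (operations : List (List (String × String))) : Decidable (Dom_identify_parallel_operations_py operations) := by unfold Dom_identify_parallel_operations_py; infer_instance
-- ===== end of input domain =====

-- B groups indices by type in ONE pass into a dict, then emits 'filter'/'aggregate' groups by lookup; return-value equivalence only.

-- ===== PORT A =====
-- two enumerate scans, each followed by a conditional append
def identify_parallel_operations_py (operations : List (List (String × String))) : List (List Int) :=
  let filter_ops : List Int :=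
    ((PySem.List.enumerate operations).filter (fun p => p.2.lookup "type" == some "filter")).map (·.1)
  let g1 : List (List Int) := if filter_ops.length > 1 then ([] : List (List Int)) ++ [filter_ops] else []
  let agg_ops : List Int :=
    ((PySem.List.enumerate operations).filter (fun p => p.2.lookup "type" == some "aggregate")).map (·.1)
  if agg_ops.length > 1 then g1 ++ [agg_ops] else g1

-- ===== PORT B =====
-- one pass: dict from type to index list (setdefault/append = modify with list append), then a fixed-order emit loop
def identify_parallel_operations_py_alt (operations : List (List (String × String))) : List (List Int) :=
  let index : PySem.Dict String (List Int) :=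
    (PySem.List.enumerate operations).foldl
      (fun d p => d.modify ((p.2.lookup "type").getD "") [] (· ++ [p.1])) PySem.Dict.empty
  (["filter", "aggregate"] : List String).foldl
    (fun gs k =>
      let group := index.getD k []
      if group.length > 1 then gs ++ [group] else gs)
    ([] : List (List Int))

-- ===== PRECONDITION & SPEC =====
-- Pre_ excludes exactly the inputs where some operation lacks the "type" key (Python A raises KeyError there).
def Pre_identify_parallel_operations_py (operations : List (List (String × String))) : Prop :=
  ∀ op ∈ operations, (op.lookup "type").isSome = true
instance (operations : List (List (String × String))) : Decidable (Pre_identify_parallel_operations_py operations) := by unfold Pre_identify_parallel_operations_py; infer_instance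

def pvWitness_identify_parallel_operations_py : (List (List (String × String))) :=
  [[("type", "filter")], [("type", "aggregate")], [("type", "filter")]]

def Spec_identify_parallel_operations_py (operations : List (List (String × String))) (out : List (List Int)) : Prop := out = identify_parallel_operations_py_alt operations
instance (operations : List (List (String × String))) (out : List (List Int)) : Decidable (Spec_identify_parallel_operations_py operations out) := by unfold Spec_identify_parallel_operations_py; infer_instance

-- ===== CLAIM (what is proved, stated in full; the proofs are below) =====
def Claim_equal_identify_parallel_operations_py : Prop := ∀ (operations : List (List (String × String))), Dom_identify_parallel_operations_py operations → Pre_identify_parallel_operations_py operations → Spec_identify_parallel_operations_py operations (identify_parallel_operations_py operations)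

-- ===== LEMMAS AND PROOFS =====

-- the grouping dict looked up at k gives exactly the indices whose op's type is k
theorem index_getD (operations : List (List (String × String))) (k : String) :
    ((PySem.List.enumerate operations).foldl
      (fun d p => d.modify ((p.2.lookup "type").getD "") [] (· ++ [p.1])) PySem.Dict.empty).getD k []
    = ((PySem.List.enumerate operations).filter
        (fun p => ((p.2.lookup "type").getD "") == k)).map (·.1) := by
  have hmap :
      ((PySem.List.enumerate operations).map
          (fun p => (((p.2.lookup "type").getD ""), p.1))).foldl
          (fun d q => d.modify q.1 [] (· ++ [q.2])) PySem.Dict.empty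
      = (PySem.List.enumerate operations).foldl
        (fun d p => d.modify ((p.2.lookup "type").getD "") [] (· ++ [p.1])) PySem.Dict.empty :=
    List.foldl_map (f := fun p : Int × List (String × String) => (((p.2.lookup "type").getD ""), p.1))
      (g := fun (d : PySem.Dict String (List Int)) (q : String × Int) => d.modify q.1 [] (· ++ [q.2]))
  rw [← hmap, PySem.Dict.getD_foldl_modify_append, PySem.Dict.getD_empty]
  simp only [List.filter_map, List.map_map]
  rfl

theorem filter_pred_congr (operations : List (List (String × String))) (k : String)
    (hpre : Pre_identify_parallel_operations_py operations) :
    (PySem.List.enumerate operations).filter (fun p => ((p.2.lookup "type").getD "") == k)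
    = (PySem.List.enumerate operations).filter (fun p => p.2.lookup "type" == some k) := by
  apply List.filter_congr
  intro p hp
  have hmem : p.2 ∈ operations := by
    rcases (PySem.List.mem_enumerate_iff _ _ _).1 hp with ⟨j, hj, rfl⟩
    exact List.getElem_mem hj
  rcases Option.isSome_iff_exists.1 (hpre p.2 hmem) with ⟨t, ht⟩
  simp [ht]

-- ===== VERDICT (by name: the statement is the Claim_ definition above) =====
theorem identify_parallel_operations_py_spec : Claim_equal_identify_parallel_operations_py := by
  intro operations _ hpre
  unfold Spec_identify_parallel_operations_py
  unfold identify_parallel_operations_py identify_parallel_operations_py_alt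
  simp only [List.foldl]
  rw [index_getD, index_getD, filter_pred_congr _ _ hpre, filter_pred_congr _ _ hpre]
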